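-- pv_equiv track=rewrite | github.com/yourim08/coding-test | 프로그래머스/0/181887. 홀수 vs 짝수/홀수 vs 짝수.py | solution
-- ===== SOURCE A (Python) =====
-- def solution(num_list):
--     answer = 0
--     oddsum = 0;
--     evensum = 0;
--     for i in range(len(num_list)):
--         if i%2==0: oddsum+=num_list[i]
--         else: evensum+=num_list[i]
--         if oddsum>evensum: answer=oddsum
--         else: answer=evensum
--     return answer
-- ===== SOURCE B (Python) =====
-- def solution(num_list):
--     # stride-2 walk over the even positions only; the odd-position total is
--     # derived from the overall sum by subtraction, with one final comparison
--     e = 0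
--     i = 0
--     n = len(num_list)
--     while i < n:
--         e += num_list[i]
--         i += 2
--     return max(e, sum(num_list) - e)
-- ===== Notes on version B (the rewrite author's own statement) =====
-- stated objective: alternative
-- what changed: B visits only the even positions with a stride-2 index walk and derives the odd-position total as overall-sum-minus-even (a quantity A never computes), comparing once at the end, instead of A's loop over every index with a parity test and a running max re-assigned each iteration.
import Mathlib
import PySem

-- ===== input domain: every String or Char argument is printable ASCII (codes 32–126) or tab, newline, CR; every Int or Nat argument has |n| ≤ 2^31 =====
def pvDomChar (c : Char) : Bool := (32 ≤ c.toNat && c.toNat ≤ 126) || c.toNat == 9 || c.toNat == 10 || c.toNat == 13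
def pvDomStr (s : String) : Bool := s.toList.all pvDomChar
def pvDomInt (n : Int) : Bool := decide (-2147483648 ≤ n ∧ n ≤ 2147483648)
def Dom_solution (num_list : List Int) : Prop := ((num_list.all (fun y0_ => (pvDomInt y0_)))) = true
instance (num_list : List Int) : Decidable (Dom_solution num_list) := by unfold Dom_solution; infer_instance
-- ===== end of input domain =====

-- B walks only the even positions with a stride-2 index and gets the odd total by
-- subtracting from the overall sum; A loops over every index with a parity test
-- and re-assigns a running max each iteration.

-- ===== PORT A =====
def solution (num_list : List Int) : Int :=
  ((PySem.List.pyRange 0 (PySem.List.len num_list) 1).foldl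
    (fun st i =>
      let oe := if PySem.Int.mod i 2 = 0
                then (st.2.1 + PySem.List.pyGetD num_list i 0, st.2.2)
                else (st.2.1, st.2.2 + PySem.List.pyGetD num_list i 0)
      ((if oe.1 > oe.2 then oe.1 else oe.2), oe.1, oe.2))
    ((0 : Int), (0 : Int), (0 : Int))).1

-- ===== PORT B =====
-- the 'while i < n: e += num_list[i]; i += 2' loop of Source B
def evenLoop (xs : List Int) (n : Int) (i : Int) (e : Int) : Int :=
  if i < n then evenLoop xs n (i + 2) (e + PySem.List.pyGetD xs i 0) else e
termination_by (n - i).toNat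
decreasing_by omega

def solution_alt (num_list : List Int) : Int :=
  let n := PySem.List.len num_list
  let e := evenLoop num_list n 0 0
  max e (num_list.sum - e)

-- ===== PRECONDITION & SPEC =====
def Spec_solution (num_list : List Int) (out : Int) : Prop := out = solution_alt num_list
instance (num_list : List Int) (out : Int) : Decidable (Spec_solution num_list out) := by unfold Spec_solution; infer_instance

-- ===== CLAIM (what is proved, stated in full; the proofs are below) =====
def Claim_equal_solution : Prop := ∀ (num_list : List Int), Dom_solution num_list → Spec_solution num_list (solution num_list)

-- ===== LEMMAS AND PROOFS =====

-- even-indexed elements of a list (proof helper)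
def evens : List Int → List Int
  | [] => []
  | [x] => [x]
  | x :: _ :: r => x :: evens r

lemma evens_cons_sum (x : Int) (r : List Int) :
    (evens (x :: r)).sum = x + (evens r.tail).sum := by
  cases r <;> simp [evens]

-- B's loop computes e + sum of even-indexed elements of the suffix from i
lemma evenLoop_eq (xs : List Int) : ∀ (i e : Int), 0 ≤ i →
    evenLoop xs (PySem.List.len xs) i e = e + (evens (xs.drop i.toNat)).sum := by
  intro i e h0
  induction i, e using (evenLoop.induct xs (PySem.List.len xs)) with
  | case1 i e hlt ih =>
      rw [evenLoop, if_pos hlt]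
      rw [ih (by omega)]
      have hi : i.toNat < xs.length := by
        simp [PySem.List.len] at hlt; omega
      have hget : PySem.List.pyGetD xs i 0 = xs[i.toNat] := by
        have hlt' : i < (xs.length : Int) := by simpa [PySem.List.len] using hlt
        simp [PySem.List.pyGetD, PySem.List.pyGet?, PySem.List.pyIdx?, h0, hlt']
      have hdrop : xs.drop i.toNat = xs[i.toNat] :: xs.drop (i.toNat + 1) :=
        List.drop_eq_getElem_cons hi
      have h2 : (i + 2).toNat = i.toNat + 2 := by omega
      rw [hdrop, evens_cons_sum, hget, h2]
      have : xs.drop (i.toNat + 2) = (xs.drop (i.toNat + 1)).tail := by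
        rw [List.tail_drop]
      rw [this]
      ring
  | case2 i e hge =>
      rw [evenLoop, if_neg hge]
      have : xs.length ≤ i.toNat := by
        simp [PySem.List.len] at hge; omega
      simp [List.drop_eq_nil_of_le this, evens]

-- sum splits into even- and odd-indexed parts
lemma sum_evens_odds : ∀ (xs : List Int),
    xs.sum = (evens xs).sum + (evens xs.tail).sum
  | [] => by simp [evens]
  | [x] => by simp [evens]
  | x :: y :: r => by
      have := sum_evens_odds r
      simp [evens, evens_cons_sum]
      omega

-- A's loop body, on an (index, value) pair
def stepE (st : Int × Int × Int) (p : Int × Int) : Int × Int × Int :=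
  let oe := if PySem.Int.mod p.1 2 = 0
            then (st.2.1 + p.2, st.2.2)
            else (st.2.1, st.2.2 + p.2)
  ((if oe.1 > oe.2 then oe.1 else oe.2), oe.1, oe.2)

lemma solution_eq_foldl_enumerate (num_list : List Int) :
    solution num_list = (List.foldl stepE (0, 0, 0) (PySem.List.enumerate num_list)).1 := by
  rw [PySem.List.enumerate_eq_map_pyRange num_list 0, List.foldl_map]
  rfl

lemma if_gt_eq_max (a b : Int) : (if a > b then a else b) = max a b := by
  split <;> omega

lemma loop_lemma : ∀ (xs : List Int) (s a e o : Int), (2:Int) ∣ s →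
    List.foldl stepE (a, e, o) (PySem.List.enumerate xs s) =
      ((if xs.isEmpty then a
        else max (e + (evens xs).sum) (o + (evens xs.tail).sum)),
       e + (evens xs).sum, o + (evens xs.tail).sum)
  | [], s, a, e, o, _ => by simp [PySem.List.enumerate_nil, evens]
  | [x], s, a, e, o, hs => by
      simp only [PySem.List.enumerate_cons, PySem.List.enumerate_nil, List.foldl_cons,
        List.foldl_nil, stepE, PySem.Int.mod_eq_zero_iff_dvd, hs, if_true, evens,
        List.tail_cons, List.isEmpty_cons, Bool.false_eq_true, if_false, Prod.mk.injEq,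
        List.sum_cons, List.sum_nil, if_gt_eq_max]
      refine ⟨by congr 1 <;> ring, by ring, by ring⟩
  | x :: y :: rest, s, a, e, o, hs => by
      rw [PySem.List.enumerate_cons, PySem.List.enumerate_cons]
      simp only [List.foldl_cons]
      have h1 : ¬ (2:Int) ∣ (s + 1) := by omega
      have hstep : stepE (stepE (a, e, o) (s, x)) (s + 1, y)
          = ((if e + x > o + y then e + x else o + y), e + x, o + y) := by
        simp [stepE, hs, h1]
      rw [hstep, loop_lemma rest (s + 1 + 1) _ (e + x) (o + y) (by omega)]
      have hx : (evens (x :: y :: rest)).sum = x + (evens rest).sum := by simp [evens]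
      simp only [List.isEmpty_cons, Bool.false_eq_true, if_false, hx, List.tail_cons,
        evens_cons_sum]
      cases rest with
      | nil =>
          simp only [List.isEmpty_nil, if_true, evens, List.sum_nil, List.tail_nil,
            Prod.mk.injEq, if_gt_eq_max]
          refine ⟨by congr 1 <;> ring, by ring, by ring⟩
      | cons r rs =>
          simp only [List.isEmpty_cons, Bool.false_eq_true, if_false, Prod.mk.injEq,
            List.tail_cons]
          refine ⟨by congr 1 <;> ring, by ring, by ring⟩

-- ===== VERDICT (by name: the statement is the Claim_ definition above) =====
theorem solution_spec : Claim_equal_solution := by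
  intro num_list _
  show solution num_list = solution_alt num_list
  rw [solution_eq_foldl_enumerate, loop_lemma num_list 0 0 0 0 ⟨0, rfl⟩]
  simp only [solution_alt, evenLoop_eq num_list 0 0 le_rfl, Int.toNat_zero,
    List.drop_zero, zero_add]
  rw [sum_evens_odds num_list]
  cases num_list with
  | nil => simp [evens]
  | cons x xs => simp
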